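-- pv_equiv track=rewrite | github.com/Nexus-Digital-Automations/Keyboard-Maestro-MCP-2 | src/intelligence/pattern_validator.py | _contains_sensitive_context_tags
-- ===== SOURCE A (Python) =====
-- from typing import Dict, Any, List, Optional, Set
--
-- def _contains_sensitive_context_tags(context_tags: Set[str]) -> bool:
--     """Check if context tags contain sensitive information."""
--     sensitive_tag_patterns = {
--         'user:', 'password:', 'secret:', 'token:', 'key:',
--         'email:', 'phone:', 'ssn:', 'credit:'
--     }
--
--     for tag in context_tags:
--         tag_lower = tag.lower()
--         if any(pattern in tag_lower for pattern in sensitive_tag_patterns):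
--             return True
--
--     return False
-- ===== SOURCE B (Python) =====
-- _WORDS = ('user', 'password', 'secret', 'token', 'key',
--           'email', 'phone', 'ssn', 'credit')
--
--
-- def _contains_sensitive_context_tags(context_tags):
--     """Check if context tags contain sensitive information.
--
--     Colon-driven scan: every sensitive pattern ends in ':', so instead of
--     running nine independent substring searches per tag, scan each tag once
--     and, at every ':', check whether the text before it ends with one of the
--     nine keywords.
--     """
--     for tag in context_tags:
--         low = tag.lower()
--         for i, ch in enumerate(low):
--             if ch == ':' and low[:i].endswith(_WORDS):
--                 return True
--     return False
-- ===== Notes on version B (the rewrite author's own statement) =====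
-- stated objective: alternative
-- what changed: B exploits that every pattern ends in ':': it scans each lowercased tag once for colons and checks the nine keywords as suffixes of the prefix before each colon, instead of running nine independent substring searches per tag.
import Mathlib
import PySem

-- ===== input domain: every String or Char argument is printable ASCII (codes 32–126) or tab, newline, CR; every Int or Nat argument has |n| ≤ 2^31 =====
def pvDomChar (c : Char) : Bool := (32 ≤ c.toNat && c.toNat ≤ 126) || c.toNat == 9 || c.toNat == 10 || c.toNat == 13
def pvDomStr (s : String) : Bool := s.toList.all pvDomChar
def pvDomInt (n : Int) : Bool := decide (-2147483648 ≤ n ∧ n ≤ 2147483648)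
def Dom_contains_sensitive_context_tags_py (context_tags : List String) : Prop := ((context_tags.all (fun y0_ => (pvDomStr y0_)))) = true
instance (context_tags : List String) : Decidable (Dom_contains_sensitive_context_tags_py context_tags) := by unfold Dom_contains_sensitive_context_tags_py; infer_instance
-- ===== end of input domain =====

-- B replaces A's nine per-tag substring searches by one colon-driven scan per tag
-- (at each ':' it checks the nine keywords as suffixes of the preceding prefix); alternative, not claimed faster.

-- ===== PORT A =====
-- the Python set literal of patterns; `any` over it is order-independent, ported as a list
def pvPatterns : List String :=
  ["user:", "password:", "secret:", "token:", "key:",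
   "email:", "phone:", "ssn:", "credit:"]

def contains_sensitive_context_tags_py : List String → Bool
  | [] => false
  | tag :: rest =>
    let tagLower := PySem.Str.lower tag
    if pvPatterns.any (fun p => PySem.Str.isIn p tagLower) then true
    else contains_sensitive_context_tags_py rest

-- ===== PORT B =====
def pvWords : List String :=
  ["user", "password", "secret", "token", "key",
   "email", "phone", "ssn", "credit"]

-- the inner `for i, ch in enumerate(low)` loop of Source B
def pvScan (low : List Char) : Nat → List Char → Bool
  | _, [] => false
  | i, c :: rest =>
    if c = ':' && pvWords.any (fun w => PySem.Chars.endswith (low.take i) w.toList) then true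
    else pvScan low (i + 1) rest

def contains_sensitive_context_tags_py_alt : List String → Bool
  | [] => false
  | tag :: rest =>
    let low := (PySem.Str.lower tag).toList
    if pvScan low 0 low then true
    else contains_sensitive_context_tags_py_alt rest

-- ===== PRECONDITION & SPEC =====
def Spec_contains_sensitive_context_tags_py (context_tags : List String) (out : Bool) : Prop := out = contains_sensitive_context_tags_py_alt context_tags
instance (context_tags : List String) (out : Bool) : Decidable (Spec_contains_sensitive_context_tags_py context_tags out) := by unfold Spec_contains_sensitive_context_tags_py; infer_instance

-- ===== CLAIM (what is proved, stated in full; the proofs are below) =====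
def Claim_equal_contains_sensitive_context_tags_py : Prop := ∀ (context_tags : List String), Dom_contains_sensitive_context_tags_py context_tags → Spec_contains_sensitive_context_tags_py context_tags (contains_sensitive_context_tags_py context_tags)

-- ===== LEMMAS AND PROOFS =====

-- a pattern `w ++ [c]` occurs in s iff some position j holds c and w is a suffix of s.take j
lemma infix_append_singleton_iff (w : List Char) (c : Char) (s : List Char) :
    (w ++ [c]) <:+: s ↔ ∃ j, ∃ hj : j < s.length, s[j] = c ∧ w <:+ s.take j := by
  constructor
  · rintro ⟨u, v, rfl⟩
    refine ⟨u.length + w.length, ?_, ?_, ?_⟩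
    · simp
    · have heq : u ++ (w ++ [c]) ++ v = (u ++ w) ++ (c :: v) := by simp
      rw [List.getElem_of_eq heq, List.getElem_append_right (by simp)]
      simp
    · have : u ++ (w ++ [c]) ++ v = (u ++ w) ++ (c :: v) := by simp
      rw [this, List.take_left' (by simp)]
      exact ⟨u, rfl⟩
  · rintro ⟨j, hj, hc, u, hu⟩
    refine ⟨u, s.drop (j + 1), ?_⟩
    have hdrop : s.drop j = c :: s.drop (j + 1) := by
      rw [List.drop_eq_getElem_cons hj, hc]
    calc u ++ (w ++ [c]) ++ s.drop (j + 1)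
        = (u ++ w) ++ (c :: s.drop (j + 1)) := by simp
      _ = s.take j ++ s.drop j := by rw [hu, hdrop]
      _ = s := List.take_append_drop _ _

-- invariant of the inner scan loop
lemma pvScan_iff (low : List Char) (i : Nat) (l : List Char) (h : l = low.drop i) :
    pvScan low i l = true ↔
      ∃ j, i ≤ j ∧ ∃ hj : j < low.length, low[j] = ':' ∧
        ∃ w ∈ pvWords, w.toList <:+ low.take j := by
  induction l generalizing i with
  | nil =>
    have hlen : low.length ≤ i := by
      have := congrArg List.length h; simp at this; omega
    simp only [pvScan]
    constructor
    · intro hfalse; simp at hfalse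
    · rintro ⟨j, hij, hj, -⟩; omega
  | cons c rest ih =>
    have hi : i < low.length := by
      by_contra hcon
      rw [List.drop_eq_nil_of_le (by omega)] at h; simp at h
    have hdrop : low.drop i = low[i] :: low.drop (i + 1) := List.drop_eq_getElem_cons hi
    obtain ⟨hc, hrest⟩ : c = low[i] ∧ rest = low.drop (i + 1) := by
      have := h.trans hdrop
      exact ⟨(List.cons.injEq _ _ _ _ ▸ this).1, (List.cons.injEq _ _ _ _ ▸ this).2⟩
    simp only [pvScan]
    by_cases hcond : (c = ':' && pvWords.any (fun w => PySem.Chars.endswith (low.take i) w.toList)) = true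
    · simp only [hcond, if_true, true_iff]
      simp only [Bool.and_eq_true, decide_eq_true_eq, List.any_eq_true] at hcond
      obtain ⟨hcolon, w, hw, hend⟩ := hcond
      exact ⟨i, le_refl i, hi, by rw [← hc, hcolon], w, hw,
        (PySem.Chars.endswith_iff _ _).mp hend⟩
    · rw [if_neg hcond, ih (i + 1) hrest]
      constructor
      · rintro ⟨j, hij, hj, hcol, hw⟩; exact ⟨j, by omega, hj, hcol, hw⟩
      · rintro ⟨j, hij, hj, hcol, hw⟩
        refine ⟨j, ?_, hj, hcol, hw⟩
        rcases Nat.lt_or_ge i j with hlt | hge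
        · omega
        · exfalso
          have hji : j = i := by omega
          subst hji
          apply hcond
          simp only [Bool.and_eq_true, decide_eq_true_eq, List.any_eq_true]
          obtain ⟨w, hwmem, hsuf⟩ := hw
          exact ⟨by rw [hc, hcol], w, hwmem, (PySem.Chars.endswith_iff _ _).mpr hsuf⟩

lemma pvPatterns_eq_map : pvPatterns = pvWords.map (fun w => w ++ ":") := by decide

-- per-tag equality of A's check and B's check
lemma tag_check_eq (s : String) :
    pvPatterns.any (fun p => PySem.Str.isIn p s) = pvScan s.toList 0 s.toList := by
  rcases hb : pvScan s.toList 0 s.toList with _ | _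
  · rw [Bool.eq_false_iff]
    intro hany
    simp only [List.any_eq_true] at hany
    obtain ⟨p, hp, hin⟩ := hany
    rw [pvPatterns_eq_map, List.mem_map] at hp
    obtain ⟨w, hw, rfl⟩ := hp
    have hin' : (w.toList ++ [':']) <:+: s.toList := by
      have := (PySem.Chars.isIn_iff_infix (w ++ ":").toList s.toList).mp (by
        simpa [PySem.Str.isIn] using hin)
      simpa using this
    obtain ⟨j, hj, hcol, hsuf⟩ := (infix_append_singleton_iff _ _ _).mp hin'
    have : pvScan s.toList 0 s.toList = true :=
      (pvScan_iff s.toList 0 s.toList (by simp)).mpr ⟨j, Nat.zero_le j, hj, hcol, w, hw, hsuf⟩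
    rw [hb] at this; exact absurd this (by simp)
  · obtain ⟨j, -, hj, hcol, w, hw, hsuf⟩ :=
      (pvScan_iff s.toList 0 s.toList (by simp)).mp hb
    simp only [List.any_eq_true]
    refine ⟨w ++ ":", ?_, ?_⟩
    · rw [pvPatterns_eq_map]; exact List.mem_map.mpr ⟨w, hw, rfl⟩
    · have : (w.toList ++ [':']) <:+: s.toList :=
        (infix_append_singleton_iff _ _ _).mpr ⟨j, hj, hcol, hsuf⟩
      have := (PySem.Chars.isIn_iff_infix (w ++ ":").toList s.toList).mpr (by simpa using this)
      simpa [PySem.Str.isIn] using this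

lemma ports_eq (context_tags : List String) :
    contains_sensitive_context_tags_py context_tags =
      contains_sensitive_context_tags_py_alt context_tags := by
  induction context_tags with
  | nil => rfl
  | cons tag rest ih =>
    simp only [contains_sensitive_context_tags_py, contains_sensitive_context_tags_py_alt]
    rw [tag_check_eq (PySem.Str.lower tag), ih]

-- ===== VERDICT (by name: the statement is the Claim_ definition above) =====
theorem contains_sensitive_context_tags_py_spec : Claim_equal_contains_sensitive_context_tags_py := by
  intro context_tags _
  unfold Spec_contains_sensitive_context_tags_py
  exact ports_eq context_tags
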